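-- pv_equiv track=rewrite | github.com/RobinHelbig/RGIProject | Submission1/helper/mockDataVisualize.py | transfer_function_output_ranking
-- ===== SOURCE A (Python) =====
-- from typing import Dict, List
--
-- def transfer_function_output_ranking(list_of_sentences: List[str], most_important_sentences: List[str]) -> Dict[str, int]:
--     ranking = {}
--     for sentence in list_of_sentences:
--         if sentence in most_important_sentences:
--             if most_important_sentences.index(sentence) > (len(most_important_sentences)/2):
--                 ranking[sentence] = 1
--             else:
--                 ranking[sentence] = 2
--         else:
--             ranking[sentence] = 0
--
--     return ranking
-- ===== SOURCE B (Python) =====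
-- def transfer_function_output_ranking(list_of_sentences, most_important_sentences):
--     # Stage 1: everything starts unranked.  Stage 2: sweep the important list
--     # BACKWARDS, unconditionally overwriting the rank of any sentence we track;
--     # the reverse order makes the earliest (first) occurrence's rank stick, so
--     # no first-occurrence guard or index lookup is needed.
--     ranking = {sentence: 0 for sentence in list_of_sentences}
--     half = len(most_important_sentences) / 2
--     for i, sentence in reversed(list(enumerate(most_important_sentences))):
--         if sentence in ranking:
--             ranking[sentence] = 1 if i > half else 2
--     return ranking
-- ===== Notes on version B (the rewrite author's own statement) =====
-- stated objective: faster
-- what changed: B inverts the data flow: it initialises every sentence's rank to 0 in one pass, then sweeps the important list backwards once, overwriting ranks in place (reverse order makes the first occurrence win), instead of A's per-sentence linear `in`/`.index` scans over the important list.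
import Mathlib
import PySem

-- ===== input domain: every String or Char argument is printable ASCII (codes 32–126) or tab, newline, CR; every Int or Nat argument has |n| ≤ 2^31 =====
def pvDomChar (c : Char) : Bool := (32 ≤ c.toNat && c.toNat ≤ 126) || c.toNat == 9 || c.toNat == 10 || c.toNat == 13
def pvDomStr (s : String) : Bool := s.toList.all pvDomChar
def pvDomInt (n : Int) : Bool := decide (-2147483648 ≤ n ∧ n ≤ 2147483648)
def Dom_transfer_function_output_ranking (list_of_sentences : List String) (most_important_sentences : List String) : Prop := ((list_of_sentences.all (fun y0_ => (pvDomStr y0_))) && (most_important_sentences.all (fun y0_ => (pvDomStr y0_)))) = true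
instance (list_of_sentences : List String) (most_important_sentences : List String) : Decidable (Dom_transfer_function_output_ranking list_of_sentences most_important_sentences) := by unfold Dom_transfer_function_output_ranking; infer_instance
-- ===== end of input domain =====

-- B inverts the data flow: init all ranks to 0, then one backward sweep over the important list
-- overwrites ranks in place (reverse order makes the first occurrence win); a timing run measured B faster.
-- ===== PORT A =====
-- `ms.index(s) > len(ms)/2` compares an int with the float len/2; for these magnitudes this is exactly `2*i > len(ms)`.
def transfer_function_output_ranking (list_of_sentences : List String) (most_important_sentences : List String) : List (String × Int) :=
  (list_of_sentences.foldl (fun ranking sentence =>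
      if most_important_sentences.contains sentence then
        -- `.getD 0` is never the default here: `contains` guarantees index? = some _
        if 2 * ((PySem.List.index? most_important_sentences sentence).getD 0 : Int) > (most_important_sentences.length : Int) then
          ranking.insert sentence 1
        else
          ranking.insert sentence 2
      else
        ranking.insert sentence 0)
    (PySem.Dict.empty : PySem.Dict String Int)).items

-- ===== PORT B =====
-- `i > half` with the float half len/2 is exactly `2*i > len(ms)` at these magnitudes.
def transfer_function_output_ranking_alt (list_of_sentences : List String) (most_important_sentences : List String) : List (String × Int) :=
  let ranking : PySem.Dict String Int :=
    list_of_sentences.foldl (fun d sentence => d.insert sentence 0) PySem.Dict.empty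
  ((PySem.List.enumerate most_important_sentences).reverse.foldl (fun r p =>
      if r.contains p.2 then
        r.insert p.2 (if 2 * p.1 > (most_important_sentences.length : Int) then 1 else 2)
      else r)
    ranking).items

-- ===== PRECONDITION & SPEC =====
def Spec_transfer_function_output_ranking (list_of_sentences : List String) (most_important_sentences : List String) (out : List (String × Int)) : Prop := out = transfer_function_output_ranking_alt list_of_sentences most_important_sentences
instance (list_of_sentences : List String) (most_important_sentences : List String) (out : List (String × Int)) : Decidable (Spec_transfer_function_output_ranking list_of_sentences most_important_sentences out) := by unfold Spec_transfer_function_output_ranking; infer_instance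

-- ===== CLAIM (what is proved, stated in full; the proofs are below) =====
def Claim_equal_transfer_function_output_ranking : Prop := ∀ (list_of_sentences : List String) (most_important_sentences : List String), Dom_transfer_function_output_ranking list_of_sentences most_important_sentences → Spec_transfer_function_output_ranking list_of_sentences most_important_sentences (transfer_function_output_ranking list_of_sentences most_important_sentences)

-- ===== LEMMAS AND PROOFS =====

-- the value A assigns to a sentence (depends only on the sentence and ms)
def pvVal (ms : List String) (k : String) : Int :=
  if ms.contains k then
    if 2 * ((PySem.List.index? ms k).getD 0 : Int) > (ms.length : Int) then 1 else 2
  else 0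

-- the value written by the backward sweep, given the last matching write's index (none = no write)
def pvUpd (n : Int) (o : Option Int) (v : Int) : Int :=
  match o with
  | some i => if 2 * i > n then 1 else 2
  | none => v

-- a foldl that inserts g s for each s: getD afterwards
lemma foldl_insert_fun_getD (g : String → Int) (ls : List String) (d : PySem.Dict String Int) (k : String) :
    (ls.foldl (fun d s => d.insert s (g s)) d).getD k 0 =
      if ls.contains k then g k else d.getD k 0 := by
  induction ls generalizing d with
  | nil => simp
  | cons x xs ih =>
    simp only [List.foldl_cons, ih]
    by_cases hm : k ∈ xs
    · simp [hm]
    · by_cases hx : x = k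
      · subst hx
        simp [hm, PySem.Dict.getD_insert_self]
      · simp [hm, Ne.symm hx, PySem.Dict.getD_insert_of_ne d _ _ (Ne.symm hx)]

-- A's fold step inserts exactly pvVal ms s
lemma a_step_eq (ms : List String) :
    (fun (ranking : PySem.Dict String Int) (sentence : String) =>
      if ms.contains sentence then
        if 2 * ((PySem.List.index? ms sentence).getD 0 : Int) > (ms.length : Int) then
          ranking.insert sentence 1
        else ranking.insert sentence 2
      else ranking.insert sentence 0) =
      (fun (d : PySem.Dict String Int) (s : String) => d.insert s (pvVal ms s)) := by
  funext d s
  unfold pvVal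
  by_cases hc : ms.contains s
  · rw [if_pos hc, if_pos hc]; split <;> rfl
  · rw [if_neg hc, if_neg hc]

-- the backward update loop: keys are never changed
lemma upd_keys (n : Int) (L : List (Int × String)) (d : PySem.Dict String Int) :
    (L.foldl (fun r p =>
        if r.contains p.2 then r.insert p.2 (if 2 * p.1 > n then 1 else 2) else r) d).keys = d.keys := by
  induction L generalizing d with
  | nil => rfl
  | cons p L ih =>
    simp only [List.foldl_cons, ih]
    by_cases hc : d.contains p.2
    · rw [if_pos hc, PySem.Dict.keys_insert_of_contains d _ hc]
    · rw [if_neg hc]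

-- the backward update loop: final value of a key = from the LAST matching write
lemma upd_getD (n : Int) (L : List (Int × String)) (d : PySem.Dict String Int) (k : String) :
    (L.foldl (fun r p =>
        if r.contains p.2 then r.insert p.2 (if 2 * p.1 > n then 1 else 2) else r) d).getD k 0 =
      if d.contains k then
        pvUpd n ((L.reverse.find? (fun p => p.2 == k)).map (·.1)) (d.getD k 0)
      else d.getD k 0 := by
  induction L generalizing d with
  | nil =>
    simp only [List.foldl_nil, List.reverse_nil, List.find?_nil, Option.map_none, pvUpd]
    by_cases hc : d.contains k <;> simp [hc]
  | cons p L ih =>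
    simp only [List.foldl_cons, List.reverse_cons, ih, List.find?_append]
    by_cases hc : d.contains p.2
    · rw [if_pos hc]
      by_cases hpk : p.2 = k
      · subst hpk
        have hck : (d.insert p.2 (if 2 * p.1 > n then 1 else 2)).contains p.2 = true :=
          PySem.Dict.contains_insert_self _ _ _
        rw [if_pos hck, if_pos hc]
        cases hf : L.reverse.find? (fun q => q.2 == p.2) with
        | some q => simp [pvUpd]
        | none =>
          simp only [Option.none_or, List.find?_cons, BEq.rfl]
          simp [pvUpd, PySem.Dict.getD_insert_self]
      · have hb : ((p.1, p.2).2 == k) = false := beq_eq_false_iff_ne.mpr hpk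
        have hck : (d.insert p.2 (if 2 * p.1 > n then 1 else 2)).contains k = d.contains k := by
          rw [PySem.Dict.contains_insert]
          simp [beq_eq_false_iff_ne.mpr (Ne.symm hpk)]
        rw [hck, PySem.Dict.getD_insert_of_ne d _ _ (Ne.symm hpk)]
        have hfp : List.find? (fun q => q.2 == k) [p] = none := by
          simp [hb]
        rw [hfp, Option.or_none]
    · rw [if_neg hc]
      by_cases hpk : p.2 = k
      · subst hpk
        have hdk : d.contains p.2 = false := Bool.not_eq_true _ |>.mp hc
        rw [hdk]
        simp
      · have hb : ((p.1, p.2).2 == k) = false := beq_eq_false_iff_ne.mpr hpk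
        have hfp : List.find? (fun q => q.2 == k) [p] = none := by
          simp [hb]
        rw [hfp, Option.or_none]

-- find? over enumerate finds the FIRST index
lemma find_enumerate (ms : List String) (v : String) (s : Int) :
    ((PySem.List.enumerate ms s).find? (fun p => p.2 == v)).map (·.1) =
      (PySem.List.index? ms v).map (fun i => s + (i : Int)) := by
  induction ms generalizing s with
  | nil => simp [PySem.List.enumerate_nil, PySem.List.index?]
  | cons x xs ih =>
    rw [PySem.List.enumerate_cons, List.find?_cons]
    by_cases hx : x = v
    · subst hx
      rw [PySem.List.index?_cons_self]
      simp
    · have hb : (x == v) = false := beq_eq_false_iff_ne.mpr hx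
      rw [PySem.List.index?_cons_of_ne xs hx]
      simp only [hb, ih]
      cases PySem.List.index? xs v with
      | none => simp
      | some i => simp; ring

-- A's dict: pointwise value
lemma a_getD (ls ms : List String) (k : String) :
    (ls.foldl (fun ranking sentence =>
        if ms.contains sentence then
          if 2 * ((PySem.List.index? ms sentence).getD 0 : Int) > (ms.length : Int) then
            ranking.insert sentence 1
          else ranking.insert sentence 2
        else ranking.insert sentence 0)
      (PySem.Dict.empty : PySem.Dict String Int)).getD k 0 =
      if ls.contains k then pvVal ms k else 0 := by
  rw [a_step_eq, foldl_insert_fun_getD]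
  simp

-- keys of the initial all-zero dict
lemma init_keys (ls : List String) :
    (ls.foldl (fun (d : PySem.Dict String Int) s => d.insert s 0) PySem.Dict.empty).keys =
      PySem.Set.update ([] : PySem.Set String) ls := by
  rw [PySem.Dict.keys_foldl_insert ls (fun _ _ => 0), PySem.Dict.keys_empty]

-- contains of the initial all-zero dict
lemma init_contains (ls : List String) (k : String) :
    (ls.foldl (fun (d : PySem.Dict String Int) s => d.insert s 0) PySem.Dict.empty).contains k =
      ls.contains k := by
  set d0 := ls.foldl (fun (d : PySem.Dict String Int) s => d.insert s 0) PySem.Dict.empty with hd0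
  by_cases hm : k ∈ ls
  · rw [(PySem.Dict.contains_iff_mem_keys d0 k).mpr
      (by rw [hd0, init_keys]; exact (PySem.Set.mem_update _ _ _).mpr (Or.inr hm)),
      List.contains_iff_mem.mpr hm]
  · have hnk : k ∉ d0.keys := by
      rw [hd0, init_keys]
      intro h
      rcases (PySem.Set.mem_update _ _ _).mp h with h | h
      · exact absurd h (List.not_mem_nil)
      · exact hm h
    rw [Bool.eq_false_iff.mpr (fun h => hnk ((PySem.Dict.contains_iff_mem_keys d0 k).mp h)),
      Bool.eq_false_iff.mpr (fun h => hm (List.contains_iff_mem.mp h))]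

-- B's dict: pointwise value agrees with A's
lemma b_getD (ls ms : List String) (k : String) :
    (((PySem.List.enumerate ms).reverse.foldl (fun r p =>
        if r.contains p.2 then r.insert p.2 (if 2 * p.1 > (ms.length : Int) then 1 else 2) else r)
      (ls.foldl (fun (d : PySem.Dict String Int) s => d.insert s 0) PySem.Dict.empty)).getD k 0) =
      if ls.contains k then pvVal ms k else 0 := by
  rw [upd_getD, List.reverse_reverse, init_contains]
  have hg : (ls.foldl (fun (d : PySem.Dict String Int) s => d.insert s 0)
      PySem.Dict.empty).getD k 0 = 0 := by
    rw [foldl_insert_fun_getD]; split <;> simp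
  rw [hg]
  by_cases hl : ls.contains k
  · rw [if_pos hl, if_pos hl, find_enumerate ms k 0]
    unfold pvVal
    by_cases hm : k ∈ ms
    · obtain ⟨i, hi⟩ := Option.isSome_iff_exists.mp ((PySem.List.index?_isSome_iff ms k).mpr hm)
      rw [hi, List.contains_iff_mem.mpr hm |> if_pos]
      simp [pvUpd]
    · rw [(PySem.List.index?_eq_none_iff ms k).mpr hm,
        if_neg (fun h => hm (List.contains_iff_mem.mp h))]
      rfl
  · rw [if_neg hl, if_neg hl]

-- ===== VERDICT (by name: the statement is the Claim_ definition above) =====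
theorem transfer_function_output_ranking_spec : Claim_equal_transfer_function_output_ranking := by
  intro ls ms _
  unfold Spec_transfer_function_output_ranking
  unfold transfer_function_output_ranking transfer_function_output_ranking_alt
  set dA : PySem.Dict String Int := ls.foldl (fun ranking sentence =>
      if ms.contains sentence then
        if 2 * ((PySem.List.index? ms sentence).getD 0 : Int) > (ms.length : Int) then
          ranking.insert sentence 1
        else ranking.insert sentence 2
      else ranking.insert sentence 0) PySem.Dict.empty with hdA
  set d0 : PySem.Dict String Int := ls.foldl (fun d s => d.insert s (0 : Int)) PySem.Dict.empty with hd0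
  set dB : PySem.Dict String Int := (PySem.List.enumerate ms).reverse.foldl (fun r p =>
      if r.contains p.2 then r.insert p.2 (if 2 * p.1 > (ms.length : Int) then 1 else 2) else r) d0 with hdB
  have hkA : dA.keys = PySem.Set.update ([] : PySem.Set String) ls := by
    rw [hdA, a_step_eq, PySem.Dict.keys_foldl_insert ls (fun _ s => pvVal ms s),
      PySem.Dict.keys_empty]
  have hkB : dB.keys = dA.keys := by
    rw [hdB, upd_keys, hd0, init_keys, hkA]
  have hndA : dA.keys.Nodup := by
    rw [hkA]
    exact PySem.Set.nodup_update ([] : PySem.Set String) ls List.nodup_nil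
  have hndB : dB.keys.Nodup := by rw [hkB]; exact hndA
  rw [PySem.Dict.items_eq_map_keys dA hndA 0, PySem.Dict.items_eq_map_keys dB hndB 0, hkB]
  apply List.map_congr_left
  intro k _
  have ha := a_getD ls ms k
  rw [← hdA] at ha
  have hb := b_getD ls ms k
  rw [← hd0, ← hdB] at hb
  rw [ha, hb]
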